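-- pv_equiv track=rewrite | github.com/fatpo/python_learning_guys | 课程/稍微复制的 flask 应用.py | get_db_from_code
-- ===== SOURCE A (Python) =====
-- def get_db_from_code(code):
--     """
--     根据 某个 code，比如 "04"，返回具体点数据库类型： db2，如果是 08，那么就要返回 db3
--     :param code: 某个 code
--     :return: 某个 db
--     """
--     DATABASE_CODE_DICT = {
--         'db1': ['01', '02'],
--         'db2': ['03', '04', '05'],
--         'db3': ['06', '07', '08', '09']
--     }
--
--     for k, v in DATABASE_CODE_DICT.items():  # 字典的遍历
--         # k 是？ v 是？
--         # k: db1, v: ['01', '02']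
--         # k: db2, v: ['03', '04', '05']
--         # k: db3, v: ['06', '07', '08', '09']
--
--         for _code in v:  # 列表的遍历，遍历  ['03', '04', '05']这个列表
--             if code == _code:
--                 return k
--     return None
-- ===== SOURCE B (Python) =====
-- def get_db_from_code(code):
--     # Table-free: valid codes are exactly '01'..'09'; classify the digit by range.
--     if len(code) != 2 or code[0] != '0' or not ('1' <= code[1] <= '9'):
--         return None
--     d = code[1]
--     if d <= '2':
--         return 'db1'
--     if d <= '5':
--         return 'db2'
--     return 'db3'
-- ===== Notes on version B (the rewrite author's own statement) =====
-- stated objective: alternative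
-- what changed: Dropped the mapping table entirely: B validates that the code has the shape '0' followed by a digit 1-9 and classifies it by numeric range comparisons ('1'-'2' -> db1, '3'-'5' -> db2, '6'-'9' -> db3), instead of A's nested scan over the db->codes dict.
import Mathlib
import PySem

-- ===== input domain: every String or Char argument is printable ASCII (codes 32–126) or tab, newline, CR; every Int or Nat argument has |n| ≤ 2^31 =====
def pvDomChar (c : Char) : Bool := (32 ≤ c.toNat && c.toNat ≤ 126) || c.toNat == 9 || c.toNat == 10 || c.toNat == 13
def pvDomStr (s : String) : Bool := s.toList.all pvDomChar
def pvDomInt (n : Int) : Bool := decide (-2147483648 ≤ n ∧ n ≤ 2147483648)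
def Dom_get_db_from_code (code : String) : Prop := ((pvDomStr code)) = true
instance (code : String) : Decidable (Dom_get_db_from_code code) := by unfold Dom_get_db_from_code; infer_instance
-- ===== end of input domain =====

-- B drops A's db->codes table entirely: it validates the shape '0'+digit 1-9 and
-- classifies the digit by range comparisons (alternative, table-free).

-- ===== PORT A =====
-- inner loop: 'for _code in v: if code == _code: return k'
def pvAInner (code : String) (k : String) : List String → Option String
  | [] => none
  | c :: rest => if code == c then some k else pvAInner code k rest

-- outer loop over DATABASE_CODE_DICT.items()
def pvAOuter (code : String) : List (String × List String) → Option String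
  | [] => none
  | (k, v) :: rest =>
    match pvAInner code k v with
    | some r => some r
    | none => pvAOuter code rest

def get_db_from_code (code : String) : Option String :=
  pvAOuter code [("db1", ["01", "02"]), ("db2", ["03", "04", "05"]),
                 ("db3", ["06", "07", "08", "09"])]

-- ===== PORT B =====
-- Source B checks len==2, code[0]=='0', '1' <= code[1] <= '9', then ranges on code[1]
def get_db_from_code_alt (code : String) : Option String :=
  match code.toList with
  | [c0, c1] =>
    if c0 = '0' ∧ '1' ≤ c1 ∧ c1 ≤ '9' then
      if c1 ≤ '2' then some "db1"
      else if c1 ≤ '5' then some "db2"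
      else some "db3"
    else none
  | _ => none

-- ===== PRECONDITION & SPEC =====
def Spec_get_db_from_code (code : String) (out : Option String) : Prop := out = get_db_from_code_alt code
instance (code : String) (out : Option String) : Decidable (Spec_get_db_from_code code out) := by unfold Spec_get_db_from_code; infer_instance

-- ===== CLAIM (what is proved, stated in full; the proofs are below) =====
def Claim_equal_get_db_from_code : Prop := ∀ (code : String), Dom_get_db_from_code code → Spec_get_db_from_code code (get_db_from_code code)

-- ===== LEMMAS AND PROOFS =====
theorem pvCharLe (c d : Char) : (c ≤ d) ↔ c.toNat ≤ d.toNat := by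
  constructor <;> intro h <;> exact Nat.le_of_lt_succ (Nat.lt_succ_of_le h)

theorem pvCharEq (c d : Char) : (c = d) ↔ c.toNat = d.toNat := by
  constructor <;> intro h
  · rw [h]
  · exact Char.ext (UInt32.toNat_inj.mp h)

-- ===== VERDICT (by name: the statement is the Claim_ definition above) =====
set_option maxRecDepth 8000 in
theorem get_db_from_code_spec : Claim_equal_get_db_from_code := by
  intro code _
  unfold Spec_get_db_from_code get_db_from_code get_db_from_code_alt
  simp only [pvAOuter, pvAInner, beq_iff_eq, String.ext_iff]
  match h : code.toList with
  | [] => simp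
  | [c] => simp
  | c0 :: c1 :: c2 :: rest => simp
  | [c0, c1] =>
    simp only [show "01".toList = ['0','1'] from rfl, show "02".toList = ['0','2'] from rfl,
      show "03".toList = ['0','3'] from rfl, show "04".toList = ['0','4'] from rfl,
      show "05".toList = ['0','5'] from rfl, show "06".toList = ['0','6'] from rfl,
      show "07".toList = ['0','7'] from rfl, show "08".toList = ['0','8'] from rfl,
      show "09".toList = ['0','9'] from rfl, List.cons.injEq, and_true,
      pvCharEq, pvCharLe,
      show '0'.toNat = 48 from rfl, show '1'.toNat = 49 from rfl,
      show '2'.toNat = 50 from rfl, show '3'.toNat = 51 from rfl,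
      show '4'.toNat = 52 from rfl, show '5'.toNat = 53 from rfl,
      show '6'.toNat = 54 from rfl, show '7'.toNat = 55 from rfl,
      show '8'.toNat = 56 from rfl, show '9'.toNat = 57 from rfl]
    split_ifs <;> first | rfl | (exfalso; omega)
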